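-- pv_equiv track=rewrite | github.com/goedel-gang/sorting | bitonic_sort.py | bitonic_merge
-- ===== SOURCE A (Python) =====
-- def bitonic_merge(l, a, b, up):
--     if b - a > 1:
--         mid = (a + b) // 2
--         for xr in bitonic_compare(l, a, b, up):
--             yield xr
--         for xr in bitonic_merge(l, a, mid, up):
--             yield xr
--         for xr in bitonic_merge(l, mid, b, up):
--             yield xr
--
-- def bitonic_compare(l, a, b, up):
--     dist = (b - a) // 2
--     for i in range(a, a + dist):
--         yield i, i + dist
--         if (l[i] > l[i + dist]) == up:
--             yield i, i + dist
--             l[i], l[i + dist] = l[i + dist], l[i]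
-- ===== SOURCE B (Python) =====
-- def bitonic_merge(l, a, b, up):
--     stack = [(a, b)]
--     while stack:
--         a, b = stack.pop()
--         if b - a > 1:
--             mid = (a + b) // 2
--             yield from bitonic_compare(l, a, b, up)
--             stack.append((mid, b))
--             stack.append((a, mid))
--
-- def bitonic_compare(l, a, b, up):
--     dist = (b - a) // 2
--     for i in range(a, a + dist):
--         yield i, i + dist
--         if (l[i] > l[i + dist]) == up:
--             yield i, i + dist
--             l[i], l[i + dist] = l[i + dist], l[i]
-- ===== Notes on version B (the rewrite author's own statement) =====
-- stated objective: alternative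
-- what changed: Replaced the three-way recursive generator by an iterative generator driven by an explicit stack of (a,b) intervals, popped in pre-order (children pushed right-then-left), reusing the same bitonic_compare step.
import Mathlib
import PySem

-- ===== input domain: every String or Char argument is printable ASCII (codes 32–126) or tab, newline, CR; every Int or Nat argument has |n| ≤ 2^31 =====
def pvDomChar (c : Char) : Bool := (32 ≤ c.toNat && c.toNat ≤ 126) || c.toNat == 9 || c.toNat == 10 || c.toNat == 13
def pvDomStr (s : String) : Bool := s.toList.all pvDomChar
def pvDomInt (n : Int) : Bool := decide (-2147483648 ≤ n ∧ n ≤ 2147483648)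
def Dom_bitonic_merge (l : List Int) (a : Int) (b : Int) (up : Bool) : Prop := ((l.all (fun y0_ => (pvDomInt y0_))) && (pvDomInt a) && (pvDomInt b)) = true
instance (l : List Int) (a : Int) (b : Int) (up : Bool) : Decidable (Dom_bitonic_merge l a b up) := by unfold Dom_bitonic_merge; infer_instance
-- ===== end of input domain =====

-- B replaces A's three-way recursion by an explicit stack of (a, b) intervals popped in pre-order
-- (objective: alternative decomposition, same cost). Both Pythons mutate l in place via the shared
-- bitonic_compare helper; the equivalence proved here is about the sequence of yielded pairs only.

-- shared helper: literal port of bitonic_compare (both Pythons use this same helper);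
-- returns (mutated list, yielded pairs). On an index out of range Python raises (excluded by Pre_).
def pvCompareLoop (l : List Int) (i : Int) (dist : Int) (up : Bool) : Nat → List Int × List (Int × Int)
  | 0 => (l, [])
  | n + 1 =>
    match PySem.List.pyGet? l i, PySem.List.pyGet? l (i + dist) with
    | some x, some y =>
      if (decide (x > y)) = up then
        let l' := PySem.List.pySetD (PySem.List.pySetD l i y) (i + dist) x
        let r := pvCompareLoop l' (i + 1) dist up n
        (r.1, (i, i + dist) :: (i, i + dist) :: r.2)
      else
        let r := pvCompareLoop l (i + 1) dist up n
        (r.1, (i, i + dist) :: r.2)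
    | _, _ => (l, [(i, i + dist)])   -- Python has yielded (i, i+dist) and then raises IndexError here

def pvCompare (l : List Int) (a : Int) (b : Int) (up : Bool) : List Int × List (Int × Int) :=
  let dist := PySem.Int.floordiv (b - a) 2
  pvCompareLoop l a dist up dist.toNat

-- termination helper for the stack version: a node of width n weighs 3^n
def pvMeas (st : List (Int × Int)) : Nat := (st.map (fun p => 3 ^ (p.2 - p.1).toNat)).sum

theorem pv_pow3_lt (k m : Nat) (hk : 1 ≤ k) (hm : 1 ≤ m) : 3 ^ k + 3 ^ m < 3 ^ (k + m) := by
  have h1 : 3 ^ k ≤ 3 ^ (k + m - 1) := Nat.pow_le_pow_right (by norm_num) (by omega)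
  have h2 : 3 ^ m ≤ 3 ^ (k + m - 1) := Nat.pow_le_pow_right (by norm_num) (by omega)
  have h3 : 3 ^ (k + m) = 3 * 3 ^ (k + m - 1) := by
    rw [← pow_succ']
    congr 1
    omega
  have h4 : 0 < 3 ^ (k + m - 1) := Nat.pow_pos (by norm_num)
  omega

theorem pv_split_lt (a b mid : Int) (h1 : a + 1 ≤ mid) (h2 : mid + 1 ≤ b) :
    3 ^ (mid - a).toNat + 3 ^ (b - mid).toNat < 3 ^ (b - a).toNat := by
  have heq : (mid - a).toNat + (b - mid).toNat = (b - a).toNat := by omega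
  have := pv_pow3_lt (mid - a).toNat (b - mid).toNat (by omega) (by omega)
  rwa [heq] at this

-- ===== PORT A =====
def pvMergeA (l : List Int) (a : Int) (b : Int) (up : Bool) : List Int × List (Int × Int) :=
  if h : b - a > 1 then
    let mid := PySem.Int.floordiv (a + b) 2
    let c := pvCompare l a b up
    let r1 := pvMergeA c.1 a mid up
    let r2 := pvMergeA r1.1 mid b up
    (r2.1, c.2 ++ r1.2 ++ r2.2)
  else (l, [])
termination_by (b - a).toNat
decreasing_by
  · rw [PySem.Int.floordiv_eq_ediv_of_pos (by norm_num : (0:Int) < 2)]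
    omega
  · rw [PySem.Int.floordiv_eq_ediv_of_pos (by norm_num : (0:Int) < 2)]
    omega

def bitonic_merge (l : List Int) (a : Int) (b : Int) (up : Bool) : List (Int × Int) :=
  (pvMergeA l a b up).2

-- ===== PORT B =====
def pvMergeB (l : List Int) (st : List (Int × Int)) (up : Bool) : List Int × List (Int × Int) :=
  match st with
  | [] => (l, [])
  | (a, b) :: rest =>
    if h : b - a > 1 then
      let mid := PySem.Int.floordiv (a + b) 2
      let c := pvCompare l a b up
      let r := pvMergeB c.1 ((a, mid) :: (mid, b) :: rest) up
      (r.1, c.2 ++ r.2)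
    else pvMergeB l rest up
termination_by pvMeas st
decreasing_by
  · simp only [pvMeas, List.map, List.sum_cons]
    have hmid : a + 1 ≤ PySem.Int.floordiv (a + b) 2 ∧ PySem.Int.floordiv (a + b) 2 + 1 ≤ b := by
      rw [PySem.Int.floordiv_eq_ediv_of_pos (by norm_num : (0:Int) < 2)]
      omega
    have := pv_split_lt a b (PySem.Int.floordiv (a + b) 2) hmid.1 hmid.2
    omega
  · simp only [pvMeas, List.map, List.sum_cons]
    have : 0 < 3 ^ ((b - a).toNat) := Nat.pow_pos (by norm_num)
    omega

def bitonic_merge_alt (l : List Int) (a : Int) (b : Int) (up : Bool) : List (Int × Int) :=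
  (pvMergeB l [(a, b)] up).2

-- ===== PRECONDITION & SPEC =====
-- Pre_ excludes exactly the inputs where Python A raises IndexError (some index in [a, b) out of range).
def Pre_bitonic_merge (l : List Int) (a : Int) (b : Int) (up : Bool) : Prop :=
  b - a ≤ 1 ∨ (-(l.length : Int) ≤ a ∧ b ≤ (l.length : Int))
instance (l : List Int) (a : Int) (b : Int) (up : Bool) : Decidable (Pre_bitonic_merge l a b up) := by unfold Pre_bitonic_merge; infer_instance
def pvWitness_bitonic_merge : List Int × Int × Int × Bool := ([3, 1, 2, 0], 0, 4, true)

def Spec_bitonic_merge (l : List Int) (a : Int) (b : Int) (up : Bool) (out : List (Int × Int)) : Prop := out = bitonic_merge_alt l a b up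
instance (l : List Int) (a : Int) (b : Int) (up : Bool) (out : List (Int × Int)) : Decidable (Spec_bitonic_merge l a b up out) := by unfold Spec_bitonic_merge; infer_instance

-- ===== CLAIM (what is proved, stated in full; the proofs are below) =====
def Claim_equal_bitonic_merge : Prop := ∀ (l : List Int) (a : Int) (b : Int) (up : Bool), Dom_bitonic_merge l a b up → Pre_bitonic_merge l a b up → Spec_bitonic_merge l a b up (bitonic_merge l a b up)

-- ===== LEMMAS AND PROOFS =====

-- popping one interval off the stack behaves like one full recursive merge of that interval
theorem pvMergeB_step (N : Nat) : ∀ (l : List Int) (a b : Int) (up : Bool) (rest : List (Int × Int)),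
    pvMeas ((a, b) :: rest) ≤ N →
    pvMergeB l ((a, b) :: rest) up =
      ((pvMergeB (pvMergeA l a b up).1 rest up).1,
       (pvMergeA l a b up).2 ++ (pvMergeB (pvMergeA l a b up).1 rest up).2) := by
  induction N with
  | zero =>
    intro l a b up rest hN
    exfalso
    have : 0 < 3 ^ ((b - a).toNat) := Nat.pow_pos (by norm_num)
    simp only [pvMeas, List.map, List.sum_cons] at hN
    omega
  | succ N ih =>
    intro l a b up rest hN
    by_cases h : b - a > 1
    · have hmid : a + 1 ≤ PySem.Int.floordiv (a + b) 2 ∧ PySem.Int.floordiv (a + b) 2 + 1 ≤ b := by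
        rw [PySem.Int.floordiv_eq_ediv_of_pos (by norm_num : (0:Int) < 2)]
        omega
      set mid := PySem.Int.floordiv (a + b) 2 with hmiddef
      have hpow := pv_split_lt a b mid hmid.1 hmid.2
      have hp1 : 0 < 3 ^ ((mid - a).toNat) := Nat.pow_pos (by norm_num)
      have hp2 : 0 < 3 ^ ((b - mid).toNat) := Nat.pow_pos (by norm_num)
      have hN' : pvMeas ((a, mid) :: (mid, b) :: rest) ≤ N := by
        simp only [pvMeas, List.map, List.sum_cons] at hN ⊢
        omega
      have hN'' : pvMeas ((mid, b) :: rest) ≤ N := by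
        simp only [pvMeas, List.map, List.sum_cons] at hN ⊢
        omega
      rw [pvMergeB, pvMergeA]
      simp only [h, dite_true, ← hmiddef]
      rw [ih _ a mid up _ hN', ih _ mid b up _ hN'']
      simp [List.append_assoc]
    · rw [pvMergeB, pvMergeA]
      simp [h]

-- ===== VERDICT (by name: the statement is the Claim_ definition above) =====
theorem bitonic_merge_spec : Claim_equal_bitonic_merge := by
  intro l a b up _ _
  unfold Spec_bitonic_merge bitonic_merge bitonic_merge_alt
  rw [pvMergeB_step (pvMeas [(a, b)]) l a b up [] le_rfl]
  simp [pvMergeB]
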